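-- pv_equiv track=rewrite | github.com/goc9000/baon | src/logic/utils.py | format_numerals
-- ===== SOURCE A (Python) =====
-- def plural(word):
--     # Incomplete and buggy, of course; word must be lowercase
--     if len(word) == 1:
--         return word + "'s"
--     if word[-1] == 'y' and word[-2] not in ('a','e','i','o','u'):
--         return word[:-1] + "ies"
--     if word[-2:] in ('sh', 'ch'):
--         return word + "es"
--
--     return word + "s"
--
-- def format_numeral(item_name_singular, item_count):
--     name = item_name_singular if item_count == 1 else plural(item_name_singular)
--
--     return "{0} {1}".format(item_count, name)
--
-- def format_numerals(counts, omit_zero_entries = True, value_if_nothing='nothing'):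
--     parts = []
--
--     if omit_zero_entries:
--         counts = [item for item in counts if item[1] > 0]
--
--     for i, item in enumerate(counts):
--         if i > 0:
--             parts.append(', ' if i != len(counts)-1 else ' and ')
--
--         parts.append(format_numeral(item[0], item[1]))
--
--     if len(parts) == 0:
--         return value_if_nothing
--
--     return ''.join(parts)
-- ===== SOURCE B (Python) =====
-- def plural(word):
--     # Incomplete and buggy, of course; word must be lowercase
--     if len(word) == 1:
--         return word + "'s"
--     if word[-1] == 'y' and word[-2] not in ('a','e','i','o','u'):
--         return word[:-1] + "ies"
--     if word[-2:] in ('sh', 'ch'):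
--         return word + "es"
--
--     return word + "s"
--
-- def format_numeral(item_name_singular, item_count):
--     name = item_name_singular if item_count == 1 else plural(item_name_singular)
--
--     return "{0} {1}".format(item_count, name)
--
-- def format_numerals(counts, omit_zero_entries = True, value_if_nothing='nothing'):
--     def phrase(pairs):
--         # pairs is nonempty; build the sentence by recursion, choosing the
--         # separator from how many pairs remain after the head
--         name, count = pairs[0]
--         head = format_numeral(name, count)
--         rest = pairs[1:]
--         if not rest:
--             return head
--         sep = ' and ' if len(rest) == 1 else ', '
--         return head + sep + phrase(rest)
--
--     kept = counts if not omit_zero_entries else [p for p in counts if p[1] > 0]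
--
--     return phrase(kept) if kept else value_if_nothing
-- ===== Notes on version B (the rewrite author's own statement) =====
-- stated objective: alternative
-- what changed: A builds an indexed parts list interleaving separators by position and joins it; B builds no parts list at all: it produces the sentence by direct recursion on the kept pairs, choosing each separator from the length of the remaining tail.
import Mathlib
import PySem

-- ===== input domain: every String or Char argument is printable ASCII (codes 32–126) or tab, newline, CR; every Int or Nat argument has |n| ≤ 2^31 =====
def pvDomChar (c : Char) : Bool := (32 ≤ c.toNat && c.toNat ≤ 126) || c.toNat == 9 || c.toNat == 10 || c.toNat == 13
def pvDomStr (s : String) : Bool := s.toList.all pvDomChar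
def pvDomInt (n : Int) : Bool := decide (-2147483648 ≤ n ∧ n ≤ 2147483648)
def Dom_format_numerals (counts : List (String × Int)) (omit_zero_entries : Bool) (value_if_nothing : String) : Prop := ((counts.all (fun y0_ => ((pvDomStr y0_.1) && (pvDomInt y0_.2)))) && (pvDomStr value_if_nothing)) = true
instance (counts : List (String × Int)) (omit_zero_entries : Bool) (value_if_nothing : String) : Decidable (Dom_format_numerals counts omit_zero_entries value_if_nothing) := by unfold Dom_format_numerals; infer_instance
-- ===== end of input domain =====

-- B builds no parts list and no join at all: it produces the sentence by direct recursion on the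
-- kept pairs, choosing each separator from the length of the remaining tail (objective: alternative).

-- ===== PORT A =====
-- shared module helper 'plural' (identical source in Source A and Source B).
-- On word = "" Python raises IndexError at word[-1]; pyGet? returns none there and the port
-- falls through — those inputs are excluded by Pre_format_numerals.
def pvPlural (w : List Char) : List Char :=
  if w.length = 1 then w ++ ['\'', 's']
  else if PySem.List.pyGet? w (-1) = some 'y' ∧
          PySem.List.pyGet? w (-2) ∉ [some 'a', some 'e', some 'i', some 'o', some 'u'] then
    PySem.List.slice w none (some (-1)) ++ ['i', 'e', 's']
  else if PySem.List.slice w (some (-2)) none = ['s', 'h'] ∨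
          PySem.List.slice w (some (-2)) none = ['c', 'h'] then w ++ ['e', 's']
  else w ++ ['s']

-- shared module helper 'format_numeral'; "{0} {1}".format(c, name) = str(c) ++ " " ++ name
def pvFmtNumeral (name : List Char) (c : Int) : List Char :=
  PySem.Int.toChars c ++ [' '] ++ (if c = 1 then name else pvPlural name)

def format_numerals (counts : List (String × Int)) (omit_zero_entries : Bool) (value_if_nothing : String) : String :=
  let counts' := if omit_zero_entries then counts.filter (fun item => item.2 > 0) else counts
  let parts : List (List Char) :=
    (PySem.List.enumerate counts').foldl
      (fun parts p =>
        (if p.1 > 0 then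
           parts ++ [if p.1 ≠ PySem.List.len counts' - 1 then ", ".toList else " and ".toList]
         else parts) ++ [pvFmtNumeral p.2.1.toList p.2.2])
      []
  if parts.length = 0 then value_if_nothing
  else String.mk (PySem.Chars.join [] parts)

-- ===== PORT B =====
-- Source B's inner 'phrase': recursion over the nonempty kept list; separator chosen by
-- the length of the tail. The [] case is unreachable in Source B (phrase is only called
-- on a nonempty list); it returns [] here only to make the function total.
def pvPhrase : List (String × Int) → List Char
  | [] => []
  | p :: rest =>
    let head := pvFmtNumeral p.1.toList p.2
    if rest = [] then head
    else head ++ (if rest.length = 1 then " and ".toList else ", ".toList) ++ pvPhrase rest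

def format_numerals_alt (counts : List (String × Int)) (omit_zero_entries : Bool) (value_if_nothing : String) : String :=
  let kept := if !omit_zero_entries then counts else counts.filter (fun p => p.2 > 0)
  if kept ≠ [] then String.mk (pvPhrase kept) else value_if_nothing

-- ===== PRECONDITION & SPEC =====
-- Pre_ excludes exactly the inputs on which Python A raises IndexError (inside plural): an item
-- that survives the zero filter, has count ≠ 1 and an empty name. (B raises there too.)
def Pre_format_numerals (counts : List (String × Int)) (omit_zero_entries : Bool) (value_if_nothing : String) : Prop :=
  ∀ p ∈ counts, (omit_zero_entries = true → 0 < p.2) → p.2 ≠ 1 → p.1 ≠ ""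
instance (counts : List (String × Int)) (omit_zero_entries : Bool) (value_if_nothing : String) : Decidable (Pre_format_numerals counts omit_zero_entries value_if_nothing) := by unfold Pre_format_numerals; infer_instance

def pvWitness_format_numerals : (List (String × Int)) × Bool × String :=
  ([("file", 2), ("error", 1), ("patch", 0)], true, "nothing")

def Spec_format_numerals (counts : List (String × Int)) (omit_zero_entries : Bool) (value_if_nothing : String) (out : String) : Prop := out = format_numerals_alt counts omit_zero_entries value_if_nothing
instance (counts : List (String × Int)) (omit_zero_entries : Bool) (value_if_nothing : String) (out : String) : Decidable (Spec_format_numerals counts omit_zero_entries value_if_nothing out) := by unfold Spec_format_numerals; infer_instance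

-- ===== CLAIM (what is proved, stated in full; the proofs are below) =====
def Claim_equal_format_numerals : Prop := ∀ (counts : List (String × Int)) (omit_zero_entries : Bool) (value_if_nothing : String), Dom_format_numerals counts omit_zero_entries value_if_nothing → Pre_format_numerals counts omit_zero_entries value_if_nothing → Spec_format_numerals counts omit_zero_entries value_if_nothing (format_numerals counts omit_zero_entries value_if_nothing)

-- ===== LEMMAS AND PROOFS =====

-- the separators-plus-items tail A's loop appends after the first item
def pvTailSpec (f : α → List Char) : List α → List (List Char)
  | [] => []
  | [y] => [" and ".toList, f y]
  | y :: ys => [", ".toList, f y] ++ pvTailSpec f ys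

theorem pv_join_nil_flatten (parts : List (List Char)) :
    PySem.Chars.join [] parts = parts.flatten := by
  induction parts with
  | nil => simp [PySem.Chars.join_nil]
  | cons x xs ih =>
    cases xs with
    | nil => simp [PySem.Chars.join_singleton]
    | cons y ys =>
      rw [PySem.Chars.join_cons_cons]
      simpa using ih

theorem pv_tail_fold (f : α → List Char) (n : Int) :
    ∀ (L : List α) (s : Int) (acc : List (List Char)), 1 ≤ s → s + L.length = n + 1 →
    (PySem.List.enumerate L s).foldl
      (fun parts p =>
        (if p.1 > 0 then
           parts ++ [if p.1 ≠ n then ", ".toList else " and ".toList]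
         else parts) ++ [f p.2])
      acc
    = acc ++ pvTailSpec f L := by
  intro L
  induction L with
  | nil => intro s acc _ _; simp [PySem.List.enumerate_nil, pvTailSpec]
  | cons y ys ih =>
    intro s acc hs hn
    rw [PySem.List.enumerate_cons, List.foldl_cons]
    cases ys with
    | nil =>
      have hsn : s = n := by simp at hn; omega
      simp [PySem.List.enumerate_nil, pvTailSpec, hsn, show (0:Int) < n by omega]
    | cons z zs =>
      have hsn : s ≠ n := by simp at hn ⊢; omega
      have hstep :
          ((if s > 0 then acc ++ [if s ≠ n then ", ".toList else " and ".toList] else acc)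
            ++ [f y])
          = acc ++ [", ".toList, f y] := by
        simp [show (0:Int) < s by omega, hsn]
      rw [hstep, ih (s+1) _ (by omega) (by simp at hn ⊢; push_cast; omega)]
      simp [pvTailSpec]

-- the item formatter both ports apply (proof-side abbreviation)
def pvF : String × Int → List Char := fun it => pvFmtNumeral it.1.toList it.2

-- A's flattened parts list equals B's recursive phrase on a nonempty kept list
theorem pv_flatten_phrase :
    ∀ (L : List (String × Int)) (x : String × Int),
    pvF x ++ (pvTailSpec pvF L).flatten = pvPhrase (x :: L) := by
  intro L
  induction L with
  | nil => intro x; simp [pvTailSpec, pvPhrase, pvF]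
  | cons y ys ih =>
    intro x
    cases ys with
    | nil => simp [pvTailSpec, pvPhrase, pvF]
    | cons z zs =>
      have hts : pvTailSpec pvF (y :: z :: zs) = [", ".toList, pvF y] ++ pvTailSpec pvF (z :: zs) := rfl
      rw [hts]
      have := ih y
      simp only [List.flatten_append, List.flatten_cons, List.flatten_nil, List.append_nil,
        List.append_assoc] at this ⊢
      rw [this]
      simp [pvPhrase, pvF]

-- ===== VERDICT (by name: the statement is the Claim_ definition above) =====
theorem format_numerals_spec : Claim_equal_format_numerals := by
  intro counts oz vin _ _
  unfold Spec_format_numerals format_numerals format_numerals_alt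
  have hfilter :
      (if oz then counts.filter (fun item => item.2 > 0) else counts)
      = (if !oz then counts else counts.filter (fun p => p.2 > 0)) := by
    cases oz <;> simp
  rw [hfilter]
  cases hL : (if !oz then counts else counts.filter (fun p => p.2 > 0)) with
  | nil => simp [PySem.List.enumerate_nil]
  | cons x L =>
    have hfold :
        (PySem.List.enumerate (x :: L)).foldl
          (fun parts p =>
            (if p.1 > 0 then
               parts ++ [if p.1 ≠ PySem.List.len (x :: L) - 1 then ", ".toList else " and ".toList]
             else parts) ++ [pvFmtNumeral p.2.1.toList p.2.2])
          []
        = [pvF x] ++ pvTailSpec pvF L := by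
      rw [PySem.List.enumerate_cons, List.foldl_cons]
      have h0 : ((if (0:Int) > 0 then
          ([] : List (List Char)) ++ [if (0:Int) ≠ PySem.List.len (x :: L) - 1 then ", ".toList else " and ".toList]
         else []) ++ [pvFmtNumeral x.1.toList x.2]) = [pvF x] := by simp [pvF]
      rw [h0]
      exact pv_tail_fold pvF (PySem.List.len (x :: L) - 1) L 1 [pvF x] (by omega)
        (by simp [PySem.List.len_eq]; push_cast; ring)
    simp only [hfold]
    rw [pv_join_nil_flatten]
    simp only [List.flatten_append, List.flatten_cons, List.flatten_nil, List.append_nil]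
    rw [pv_flatten_phrase]
    simp
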